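-- pv_equiv track=rewrite | github.com/amptimal/surge | scripts/render_public_surface.py | render_cli_surface
-- ===== SOURCE A (Python) =====
-- def extract_possible_values(help_text: str, option_name: str) -> list[str]:
--     lines = help_text.splitlines()
--     for index, line in enumerate(lines):
--         if option_name not in line:
--             continue
--         # Scan the option line itself and the next few lines for the values tag.
--         for offset in range(index, min(index + 8, len(lines))):
--             candidate = lines[offset]
--             prefix = "[possible values: "
--             pos = candidate.find(prefix)
--             if pos == -1:
--                 continue
--             tail = candidate[pos + len(prefix) :]
--             bracket = tail.find("]")
--             if bracket == -1:
--                 continue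
--             return [value.strip() for value in tail[:bracket].split(",")]
--     return []
--
-- def render_cli_surface(help_text: str) -> str:
--     methods = extract_possible_values(help_text, "--method <METHOD>")
--     solvers = extract_possible_values(help_text, "--solver <SOLVER>")
--     lines = [
--         "# Generated CLI Surface",
--         "",
--         "_Generated by `scripts/render_public_surface.py`. Do not edit directly._",
--         "",
--         "## Canonical Methods",
--         "",
--     ]
--     if methods:
--         lines.extend(f"- `{method}`" for method in methods)
--     else:
--         lines.append("- Could not parse method list from `surge-solve --help`.")
--
--     lines.extend(["", "## Solver Backends", ""])
--     if solvers:
--         lines.extend(f"- `{solver}`" for solver in solvers)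
--     else:
--         lines.append("- Could not parse solver backend list from `surge-solve --help`.")
--
--     lines.extend(
--         [
--             "",
--             "## Full Help Output",
--             "",
--             "```text",
--             help_text,
--             "```",
--             "",
--         ]
--     )
--     return "\n".join(lines)
-- ===== SOURCE B (Python) =====
-- def _parse_values_tag(line):
--     prefix = "[possible values: "
--     pos = line.find(prefix)
--     if pos == -1:
--         return None
--     tail = line[pos + len(prefix):]
--     bracket = tail.find("]")
--     if bracket == -1:
--         return None
--     return [value.strip() for value in tail[:bracket].split(",")]
--
--
-- def extract_possible_values(help_text, option_name):
--     # Single pass with a countdown window instead of a nested re-scan.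
--     remaining = 0
--     for line in help_text.splitlines():
--         if option_name in line:
--             remaining = 8
--         if remaining:
--             values = _parse_values_tag(line)
--             if values is not None:
--                 return values
--             remaining -= 1
--     return []
--
--
-- def _bullets(values, fallback):
--     return [f"- `{value}`" for value in values] or [fallback]
--
--
-- def render_cli_surface(help_text):
--     methods = extract_possible_values(help_text, "--method <METHOD>")
--     solvers = extract_possible_values(help_text, "--solver <SOLVER>")
--     return "\n".join([
--         "# Generated CLI Surface",
--         "",
--         "_Generated by `scripts/render_public_surface.py`. Do not edit directly._",
--         "",
--         "## Canonical Methods",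
--         "",
--         *_bullets(methods, "- Could not parse method list from `surge-solve --help`."),
--         "",
--         "## Solver Backends",
--         "",
--         *_bullets(solvers, "- Could not parse solver backend list from `surge-solve --help`."),
--         "",
--         "## Full Help Output",
--         "",
--         "```text",
--         help_text,
--         "```",
--         "",
--     ])
-- ===== Notes on version B (the rewrite author's own statement) =====
-- stated objective: alternative
-- what changed: extract_possible_values becomes a single forward pass keeping a countdown window (set to 8 on each option line) instead of re-scanning an 8-line window by index for every line containing the option; the markdown glue is rebuilt as one literal list with a bullets helper instead of successive conditional extends.
import Mathlib
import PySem

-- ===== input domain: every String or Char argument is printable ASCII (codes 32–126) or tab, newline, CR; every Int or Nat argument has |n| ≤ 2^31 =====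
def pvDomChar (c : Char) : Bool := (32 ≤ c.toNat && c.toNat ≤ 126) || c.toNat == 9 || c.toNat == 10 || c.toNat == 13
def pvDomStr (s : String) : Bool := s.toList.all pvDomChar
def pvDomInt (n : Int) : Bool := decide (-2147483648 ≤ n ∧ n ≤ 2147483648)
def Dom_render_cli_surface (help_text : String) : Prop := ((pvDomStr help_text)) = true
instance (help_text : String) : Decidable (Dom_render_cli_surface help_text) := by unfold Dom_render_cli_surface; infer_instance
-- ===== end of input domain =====

-- B rewrites extract_possible_values as a single pass with a countdown window instead of a
-- nested per-option-line window re-scan, and builds the markdown line list as one literal.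

-- ===== PORT A =====

-- inner loop of extract_possible_values: scan the window's candidate lines in order
-- (tail[:bracket].split(",") with the nonempty separator "," is Str.split?, always some)
def pvScanA (win : List String) : Option (List String) :=
  match win with
  | [] => none
  | candidate :: rest =>
    let pos := PySem.Str.find candidate "[possible values: "
    if pos = -1 then pvScanA rest
    else
      let tail := PySem.Str.slice candidate (some (pos + PySem.Str.len "[possible values: ")) none
      let bracket := PySem.Str.find tail "]"
      if bracket = -1 then pvScanA rest
      else some (((PySem.Str.split? (PySem.Str.slice tail none (some bracket)) ",").getD []).map PySem.Str.strip)

-- outer loop over enumerate(lines); the candidates lines[index : min(index+8, len(lines))]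
-- are exactly the first 8 lines of the current suffix, scanned in the same order
def pvOuterA (option_name : String) : List String → List String
  | [] => []
  | line :: rest =>
    if PySem.Str.isIn option_name line then
      match pvScanA ((line :: rest).take 8) with
      | some vs => vs
      | none => pvOuterA option_name rest
    else pvOuterA option_name rest

def pvExtractA (help_text option_name : String) : List String :=
  pvOuterA option_name (PySem.Str.splitlines help_text)

def render_cli_surface (help_text : String) : String :=
  let methods := pvExtractA help_text "--method <METHOD>"
  let solvers := pvExtractA help_text "--solver <SOLVER>"
  let lines := ["# Generated CLI Surface", "",
    "_Generated by `scripts/render_public_surface.py`. Do not edit directly._", "",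
    "## Canonical Methods", ""]
  let lines := if methods ≠ [] then lines ++ methods.map (fun m => PySem.Str.join "" ["- `", m, "`"])
    else lines ++ ["- Could not parse method list from `surge-solve --help`."]
  let lines := lines ++ ["", "## Solver Backends", ""]
  let lines := if solvers ≠ [] then lines ++ solvers.map (fun s => PySem.Str.join "" ["- `", s, "`"])
    else lines ++ ["- Could not parse solver backend list from `surge-solve --help`."]
  let lines := lines ++ ["", "## Full Help Output", "", "```text", help_text, "```", ""]
  PySem.Str.join "\n" lines

-- ===== PORT B =====

def pvParseTag (line : String) : Option (List String) :=
  let pos := PySem.Str.find line "[possible values: "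
  if pos = -1 then none
  else
    let tail := PySem.Str.slice line (some (pos + PySem.Str.len "[possible values: ")) none
    let bracket := PySem.Str.find tail "]"
    if bracket = -1 then none
    else some (((PySem.Str.split? (PySem.Str.slice tail none (some bracket)) ",").getD []).map PySem.Str.strip)

-- single pass with the countdown `remaining`
def pvGoB (option_name : String) : List String → Nat → List String
  | [], _ => []
  | line :: rest, remaining =>
    let remaining := if PySem.Str.isIn option_name line then 8 else remaining
    if 0 < remaining then
      match pvParseTag line with
      | some vs => vs
      | none => pvGoB option_name rest (remaining - 1)
    else pvGoB option_name rest 0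

def pvExtractB (help_text option_name : String) : List String :=
  pvGoB option_name (PySem.Str.splitlines help_text) 0

def pvBullets (values : List String) (fallback : String) : List String :=
  let bs := values.map (fun v => PySem.Str.join "" ["- `", v, "`"])
  if bs = [] then [fallback] else bs

def render_cli_surface_alt (help_text : String) : String :=
  let methods := pvExtractB help_text "--method <METHOD>"
  let solvers := pvExtractB help_text "--solver <SOLVER>"
  PySem.Str.join "\n"
    (["# Generated CLI Surface", "",
      "_Generated by `scripts/render_public_surface.py`. Do not edit directly._", "",
      "## Canonical Methods", ""]
     ++ pvBullets methods "- Could not parse method list from `surge-solve --help`."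
     ++ ["", "## Solver Backends", ""]
     ++ pvBullets solvers "- Could not parse solver backend list from `surge-solve --help`."
     ++ ["", "## Full Help Output", "", "```text", help_text, "```", ""])

-- ===== PRECONDITION & SPEC =====
def Spec_render_cli_surface (help_text : String) (out : String) : Prop := out = render_cli_surface_alt help_text
instance (help_text : String) (out : String) : Decidable (Spec_render_cli_surface help_text out) := by unfold Spec_render_cli_surface; infer_instance

-- ===== CLAIM (what is proved, stated in full; the proofs are below) =====
def Claim_equal_render_cli_surface : Prop := ∀ (help_text : String), Dom_render_cli_surface help_text → Spec_render_cli_surface help_text (render_cli_surface help_text)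

-- ===== LEMMAS AND PROOFS =====

theorem pvScanA_eq_findSome (win : List String) :
    pvScanA win = win.findSome? pvParseTag := by
  induction win with
  | nil => simp [pvScanA]
  | cons c rest ih =>
    simp only [pvScanA, pvParseTag, List.findSome?_cons]
    split_ifs <;> simp [ih]

theorem pvFindSome_take_mono {α β : Type} (p : α → Option β) (xs : List α) (m n : Nat)
    (hmn : m ≤ n) (v : β) (h : (xs.take m).findSome? p = some v) :
    (xs.take n).findSome? p = some v := by
  induction xs generalizing m n with
  | nil => simp at h
  | cons x rest ih =>
    cases m with
    | zero => simp at h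
    | succ m' =>
      cases n with
      | zero => omega
      | succ n' =>
        simp only [List.take_succ_cons, List.findSome?_cons] at h ⊢
        cases hp : p x with
        | some w => simp [hp] at h ⊢; exact h
        | none => simp only [hp] at h ⊢; exact ih m' n' (by omega) h

theorem pvMain (opt : String) (ls : List String) (r : Nat) (hr : r ≤ 8) :
    (match (ls.take r).findSome? pvParseTag with
     | some vs => vs
     | none => pvOuterA opt ls) = pvGoB opt ls r := by
  induction ls generalizing r with
  | nil => simp [pvGoB, pvOuterA]
  | cons l rest ih =>
    have hw : pvScanA (l :: rest.take 7) = List.findSome? pvParseTag (l :: rest.take 7) :=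
      pvScanA_eq_findSome _
    by_cases hc : PySem.Chars.isIn opt.toList l.toList = true
    · -- option line: A scans the 8-line window, B resets the countdown to 8
      cases hp : pvParseTag l with
      | some vs =>
        have hB : pvGoB opt (l :: rest) r = vs := by simp [pvGoB, hc, hp]
        rw [hB]
        cases r with
        | zero =>
          simp [pvOuterA, hc, List.take_succ_cons, hw, hp]
        | succ n =>
          simp [List.take_succ_cons, hp]
      | none =>
        have hB : pvGoB opt (l :: rest) r = pvGoB opt rest 7 := by simp [pvGoB, hc, hp]
        have hA : pvOuterA opt (l :: rest) =
            (match (rest.take 7).findSome? pvParseTag with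
             | some vs => vs
             | none => pvOuterA opt rest) := by
          simp [pvOuterA, hc, List.take_succ_cons, hw, hp]
        rw [hB, ← ih 7 (by omega)]
        cases r with
        | zero => simpa using hA
        | succ n =>
          rw [List.take_succ_cons, List.findSome?_cons, hp, hA]
          cases h7 : (rest.take 7).findSome? pvParseTag with
          | none =>
            have hn : (rest.take n).findSome? pvParseTag = none := by
              cases h : (rest.take n).findSome? pvParseTag with
              | none => rfl
              | some w =>
                have h2 := pvFindSome_take_mono pvParseTag rest n 7 (by omega) w h
                rw [h2] at h7; simp at h7
            simp [hn]
          | some v =>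
            have hn : (rest.take n).findSome? pvParseTag = none ∨
                (rest.take n).findSome? pvParseTag = some v := by
              cases h : (rest.take n).findSome? pvParseTag with
              | none => exact Or.inl rfl
              | some w =>
                have h2 := pvFindSome_take_mono pvParseTag rest n 7 (by omega) w h
                rw [h2] at h7
                exact Or.inr h7
            rcases hn with h | h <;> simp [h]
    · -- non-option line: the countdown just ticks
      cases r with
      | zero =>
        have hB : pvGoB opt (l :: rest) 0 = pvGoB opt rest 0 := by simp [pvGoB, hc]
        rw [hB, ← ih 0 (by omega)]
        simp [pvOuterA, hc]
      | succ n =>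
        cases hp : pvParseTag l with
        | some vs =>
          have hB : pvGoB opt (l :: rest) (n + 1) = vs := by simp [pvGoB, hc, hp]
          rw [hB]
          simp [List.take_succ_cons, hp]
        | none =>
          have hB : pvGoB opt (l :: rest) (n + 1) = pvGoB opt rest n := by
            simp [pvGoB, hc, hp]
          rw [hB, ← ih n (by omega)]
          simp [List.take_succ_cons, hp, pvOuterA, hc]

theorem pvExtract_eq (help_text option_name : String) :
    pvExtractA help_text option_name = pvExtractB help_text option_name := by
  unfold pvExtractA pvExtractB
  have := pvMain option_name (PySem.Str.splitlines help_text) 0 (by omega)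
  simpa using this

theorem render_cli_surface_spec : Claim_equal_render_cli_surface := by
  intro help_text _
  unfold Spec_render_cli_surface
  simp only [render_cli_surface, render_cli_surface_alt, pvExtract_eq]
  cases hm : pvExtractB help_text "--method <METHOD>" <;>
    cases hs : pvExtractB help_text "--solver <SOLVER>" <;>
      simp [pvBullets]
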